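-- pv_equiv track=rewrite | github.com/sjayona13/hilingo | hilingo_backend/app.py | translate_text
-- ===== SOURCE A (Python) =====
-- def translate_text(text, source_dict):
--     text = text.lower().strip()
--     words = text.split()
--     translated = []
--     i = 0
--
--     while i < len(words):
--         match_found = False
--         # Try longest phrases first (from remaining words)
--         for j in range(len(words), i, -1):
--             phrase = ' '.join(words[i:j])
--             if phrase in source_dict:
--                 translated.append(source_dict[phrase])
--                 i = j
--                 match_found = True
--                 break
--         if not match_found:
--             # Fallback: copy untranslated word as-is
--             translated.append(words[i])
--             i += 1
--
--     return ' '.join(translated)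
-- ===== SOURCE B (Python) =====
-- def translate_text(text, source_dict):
--     words = text.lower().strip().split()
--     # split every dictionary key into its word list once, up front
--     entries = [(key.split(' '), value) for key, value in source_dict.items()]
--     out = []
--     i = 0
--     while i < len(words):
--         best_len, best_val = 0, words[i]
--         for toks, value in entries:
--             L = len(toks)
--             if L > best_len and words[i:i + L] == toks:
--                 best_len, best_val = L, value
--         out.append(best_val)
--         i += best_len if best_len else 1
--     return ' '.join(out)
-- ===== Notes on version B (the rewrite author's own statement) =====
-- stated objective: alternative
-- what changed: Instead of A's inner loop over all phrase lengths that joins words[i:j] into a string and tests dict membership per length, B pre-splits every dictionary key into its token list once and at each position scans the entries comparing word-list slices directly, keeping the longest match.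
import Mathlib
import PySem

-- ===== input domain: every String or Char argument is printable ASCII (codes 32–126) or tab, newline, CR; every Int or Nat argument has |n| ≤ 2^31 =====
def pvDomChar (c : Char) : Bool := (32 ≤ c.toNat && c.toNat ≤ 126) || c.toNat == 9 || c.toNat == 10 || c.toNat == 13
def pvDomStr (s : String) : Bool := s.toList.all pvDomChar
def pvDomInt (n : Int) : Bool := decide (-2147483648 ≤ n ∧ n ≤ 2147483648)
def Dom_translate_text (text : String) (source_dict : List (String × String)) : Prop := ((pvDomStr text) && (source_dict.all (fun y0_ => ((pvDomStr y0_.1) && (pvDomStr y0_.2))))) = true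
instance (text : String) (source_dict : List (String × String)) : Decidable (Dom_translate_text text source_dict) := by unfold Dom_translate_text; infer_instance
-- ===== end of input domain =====

-- B replaces A's per-position inner loop over phrase lengths (joining words[i:j] and testing dict
-- membership for each j) by a one-time split of every dictionary key into its word list, scanning the
-- entries at each position and keeping the longest slice match (objective: alternative, not timed faster).

-- ===== PORT A =====
-- inner  `for j in range(len(words), i, -1): … break`  loop of A: first (longest) matching phrase.
-- phrase = ' '.join(words[i:j])
def tA_phrase (words : List String) (i j : Nat) : String :=
  PySem.Str.join " " (PySem.List.slice words (some (i : Int)) (some (j : Int)))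

def tA_find (d : PySem.Dict String String) (words : List String) (i j : Nat) :
    Option (String × Nat) :=
  if i < j then
    if d.contains (tA_phrase words i j) then some (d.getD (tA_phrase words i j) "", j)
    else tA_find d words i (j - 1)
  else none

-- used by tA_loop's decreasing_by: a found match advances i
theorem tA_find_gt {d words i j v j'} (h : tA_find d words i j = some (v, j')) : i < j' := by
  induction j using Nat.strong_induction_on with
  | _ j ih =>
    rw [tA_find] at h
    split at h
    · split at h
      · cases h; omega
      · exact ih (j - 1) (by omega) h
    · exact absurd h (by simp)

-- A's while loop; `translated` is the accumulator list
def tA_loop (d : PySem.Dict String String) (words : List String) (i : Nat)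
    (translated : List String) : List String :=
  if h : i < words.length then
    match hf : tA_find d words i words.length with
    | some (v, j) => tA_loop d words j (translated ++ [v])
    | none => tA_loop d words (i + 1) (translated ++ [words[i]])
  else translated
termination_by words.length - i
decreasing_by
  · have := tA_find_gt hf; omega
  · omega

def translate_text (text : String) (source_dict : List (String × String)) : String :=
  let d := PySem.Dict.ofList source_dict
  let words := PySem.Str.split₀ (PySem.Str.strip (PySem.Str.lower text))
  PySem.Str.join " " (tA_loop d words 0 [])

-- ===== PORT B =====
-- key.split(' ')
def tB_toks (key : String) : List String :=
  match PySem.Str.split? key " " with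
  | some t => t
  | none => []

-- [(key.split(' '), value) for key, value in source_dict.items()]
def tB_entries (source_dict : List (String × String)) : List (List String × String) :=
  (PySem.Dict.ofList source_dict).items.map (fun p => (tB_toks p.1, p.2))

-- the `for toks, value in entries` scan; initial best_val is words[i] (every call has i < len(words))
def tB_best (words : List String) (i : Nat) (entries : List (List String × String)) :
    Nat × String :=
  entries.foldl (fun best e =>
    if e.1.length > best.1 ∧
        PySem.List.slice words (some (i : Int)) (some ((i + e.1.length : Nat) : Int)) = e.1 then
      (e.1.length, e.2)
    else best)
    (0, words.getD i "")

-- B's while loop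
def tB_loop (words : List String) (entries : List (List String × String)) (i : Nat)
    (out : List String) : List String :=
  if i < words.length then
    let b := tB_best words i entries
    tB_loop words entries (i + (if b.1 = 0 then 1 else b.1)) (out ++ [b.2])
  else out
termination_by words.length - i
decreasing_by split <;> omega

def translate_text_alt (text : String) (source_dict : List (String × String)) : String :=
  let words := PySem.Str.split₀ (PySem.Str.strip (PySem.Str.lower text))
  PySem.Str.join " " (tB_loop words (tB_entries source_dict) 0 [])

-- ===== PRECONDITION & SPEC =====
def Spec_translate_text (text : String) (source_dict : List (String × String)) (out : String) : Prop := out = translate_text_alt text source_dict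
instance (text : String) (source_dict : List (String × String)) (out : String) : Decidable (Spec_translate_text text source_dict out) := by unfold Spec_translate_text; infer_instance

-- ===== CLAIM (what is proved, stated in full; the proofs are below) =====
def Claim_equal_translate_text : Prop := ∀ (text : String) (source_dict : List (String × String)), Dom_translate_text text source_dict → Spec_translate_text text source_dict (translate_text text source_dict)

-- ===== LEMMAS AND PROOFS =====

theorem modifyHead_modifyHead' {α} (f g : List α → List α) (xs : List (List α)) :
    (xs.modifyHead g).modifyHead f = xs.modifyHead (fun x => f (g x)) := by
  cases xs <;> simp

theorem go_eq (a : Char) : ∀ (fuel : Nat) (l cur : List Char) (acc : List (List Char)),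
    l.length < fuel → a ∉ cur →
    PySem.Chars.splitOn.go [a] fuel l cur acc
      = acc.reverse ++ (List.splitOn a l).modifyHead (cur.reverse ++ ·) := by
  intro fuel
  induction fuel with
  | zero => intro l cur acc h; omega
  | succ fuel ih =>
    intro l cur acc h hcur
    match l with
    | [] =>
      simp [PySem.Chars.splitOn.go, List.splitOn]
    | c :: rest =>
      rw [PySem.Chars.splitOn.go]
      have hpre : [a].isPrefixOf (c :: rest) = (a == c) := by
        simp [List.isPrefixOf]
      rw [hpre]
      by_cases hac : a = c
      · subst hac
        rw [if_pos (by simp)]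
        rw [show List.drop [a].length (a :: rest) = rest by simp]
        rw [ih rest [] (cur.reverse :: acc) (by simpa using h) (by simp)]
        rw [show (List.splitOn a (a :: rest)) = [] :: List.splitOn a rest by
          simp [List.splitOn, List.splitOnP_cons]]
        cases List.splitOn a rest <;> simp
      · rw [if_neg (by simp [hac])]
        rw [ih rest (c :: cur) acc (by simpa using h) (by simp [hcur]; exact hac)]
        rw [show (List.splitOn a (c :: rest))
              = (List.splitOn a rest).modifyHead (c :: ·) by
          simp [List.splitOn, List.splitOnP_cons, Ne.symm hac]]
        rw [modifyHead_modifyHead']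
        simp

theorem chars_splitOn_eq (a : Char) (s : List Char) :
    PySem.Chars.splitOn s [a] = List.splitOn a s := by
  rw [PySem.Chars.splitOn, go_eq a (s.length + 1) s [] [] (by omega) (by simp)]
  cases h : List.splitOn a s with
  | nil => exact absurd h (by simp [List.splitOn, List.splitOnP_ne_nil])
  | cons x xs => simp

theorem tB_toks_eq (k : String) :
    tB_toks k = (List.splitOn ' ' k.toList).map String.ofList := by
  simp [tB_toks, PySem.Str.split?, PySem.Chars.split?, chars_splitOn_eq]

-- every word of split₀ is nonempty and whitespace-free
theorem split₀_go_good (P : List Char → Prop)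
    (hP : ∀ w, w ≠ [] → (∀ c ∈ w, PySem.Chars.isspace c = false) → P w) :
    ∀ (s cur : List Char) (acc : List (List Char)),
    (∀ c ∈ cur, PySem.Chars.isspace c = false) → (∀ w ∈ acc, P w) →
    ∀ w ∈ PySem.Chars.split₀.go s cur acc, P w := by
  intro s
  induction s with
  | nil =>
    intro cur acc hcur hacc w hw
    rw [PySem.Chars.split₀.go] at hw
    split at hw
    · simp at hw; exact hacc _ (by simpa using hw)
    · simp only [List.reverse_cons] at hw
      rcases List.mem_append.mp hw with h | h
      · exact hacc _ (List.mem_reverse.mp h)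
      · have hc : w = cur.reverse := by simpa using h
        subst hc
        refine hP _ (by rename_i hne; simpa using hne) ?_
        intro d hd; exact hcur d (List.mem_reverse.mp hd)
  | cons c rest ih =>
    intro cur acc hcur hacc w hw
    rw [PySem.Chars.split₀.go] at hw
    split at hw
    · split at hw
      · exact ih [] acc (by simp) hacc w hw
      · refine ih [] (cur.reverse :: acc) (by simp) ?_ w hw
        intro u hu
        rcases List.mem_cons.mp hu with h | h
        · subst h
          refine hP _ (by simpa using (by rename_i hsp hne; simpa using hne)) ?_
          intro d hd; exact hcur d (List.mem_reverse.mp hd)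
        · exact hacc _ h
    · exact ih (c :: cur) acc (by
        intro d hd
        rcases List.mem_cons.mp hd with h | h
        · subst h; rename_i hsp; simpa using hsp
        · exact hcur d h) hacc w hw

theorem split₀_good (cs : List Char) :
    ∀ w ∈ PySem.Chars.split₀ cs, w ≠ [] ∧ ∀ c ∈ w, PySem.Chars.isspace c = false := by
  intro w hw
  exact split₀_go_good (fun w => w ≠ [] ∧ ∀ c ∈ w, PySem.Chars.isspace c = false)
    (fun w h1 h2 => ⟨h1, h2⟩) cs [] [] (by simp) (by simp) w hw

theorem toks_eq_iff (k : String) (ws : List String) (hne : ws ≠ [])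
    (hg : ∀ w ∈ ws, ' ' ∉ w.toList) :
    tB_toks k = ws ↔ k = PySem.Str.join " " ws := by
  rw [tB_toks_eq]
  constructor
  · intro h
    have hmap : ws.map String.toList = List.splitOn ' ' k.toList := by
      rw [← h]; simp [List.map_map, Function.comp_def]
    have : (" ".toList).intercalate (ws.map String.toList) = k.toList := by
      rw [hmap]
      simpa using List.intercalate_splitOn k.toList ' '
    rw [PySem.Str.join, PySem.Chars.join, this, String.ofList_toList]
  · intro h
    subst h
    have htl : (PySem.Str.join " " ws).toList = [' '].intercalate (ws.map String.toList) := by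
      simp [PySem.Str.join, PySem.Chars.join]
    rw [htl, List.splitOn_intercalate (ws.map String.toList) ' '
      (by intro l hl; rcases List.mem_map.mp hl with ⟨w, hw, rfl⟩; exact hg w hw)
      (by simpa using hne)]
    simp [List.map_map, Function.comp_def]

theorem dict_contains_iff (d : PySem.Dict String String) (k : String) :
    d.contains k = true ↔ ∃ p ∈ d.items, p.1 = k := by
  simp [PySem.Dict.contains, List.any_eq_true]

theorem find?_key_of_mem_nodup (k v : String) :
    ∀ (l : List (String × String)), (l.map Prod.fst).Nodup → (k, v) ∈ l →
    l.find? (fun p => p.1 == k) = some (k, v) := by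
  intro l
  induction l with
  | nil => intro _ h; simp at h
  | cons p l ih =>
    intro hnd hm
    rcases List.mem_cons.mp hm with h | h
    · subst h; simp [List.find?]
    · rw [List.map_cons, List.nodup_cons] at hnd
      have hk : p.1 ≠ k := by
        intro hpk
        exact hnd.1 (by rw [hpk]; exact List.mem_map.mpr ⟨(k, v), h, rfl⟩)
      rw [List.find?]
      have hb : (p.1 == k) = false := by simpa using hk
      rw [hb]
      exact ih hnd.2 h

theorem dict_getD_of_mem (d : PySem.Dict String String) (k v : String)
    (hnd : d.keys.Nodup) (hm : (k, v) ∈ d.items) : d.getD k "" = v := by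
  have hfind := find?_key_of_mem_nodup k v d.items hnd hm
  simp [PySem.Dict.getD, PySem.Dict.get?, hfind]


-- ===== A-side inner-loop characterization =====

theorem tA_find_none_iff (d : PySem.Dict String String) (words : List String) (i : Nat) :
    ∀ j, tA_find d words i j = none ↔
      ∀ t, i < t → t ≤ j → d.contains (tA_phrase words i t) = false := by
  intro j
  induction j using Nat.strong_induction_on with
  | _ j ih =>
    rw [tA_find]
    by_cases hij : i < j
    · rw [if_pos hij]
      by_cases hc : d.contains (tA_phrase words i j)
      · rw [if_pos hc]
        simp only [reduceCtorEq, false_iff]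
        intro hall
        exact absurd hc (by simp [hall j hij (le_refl j)])
      · rw [if_neg hc]
        rw [ih (j - 1) (by omega)]
        constructor
        · intro hall t h1 h2
          by_cases ht : t = j
          · subst ht; simpa using hc
          · exact hall t h1 (by omega)
        · intro hall t h1 h2; exact hall t h1 (by omega)
    · rw [if_neg hij]
      simp only [true_iff]
      intro t h1 h2; omega

theorem tA_find_some_spec (d : PySem.Dict String String) (words : List String) (i : Nat) :
    ∀ j v j', tA_find d words i j = some (v, j') →
      j' ≤ j ∧ d.contains (tA_phrase words i j') = true ∧
      v = d.getD (tA_phrase words i j') "" ∧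
      ∀ t, j' < t → t ≤ j → d.contains (tA_phrase words i t) = false := by
  intro j
  induction j using Nat.strong_induction_on with
  | _ j ih =>
    intro v j' h
    rw [tA_find] at h
    split at h
    · split at h
      · rename_i hij hc
        cases h
        exact ⟨le_refl _, hc, rfl, fun t h1 h2 => by omega⟩
      · rename_i hij hc
        obtain ⟨h1, h2, h3, h4⟩ := ih (j - 1) (by omega) v j' h
        refine ⟨by omega, h2, h3, ?_⟩
        intro t ht1 ht2
        by_cases ht : t = j
        · subst ht; simpa using hc
        · exact h4 t ht1 (by omega)
    · exact absurd h (by simp)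

-- ===== B-side fold characterization =====

theorem tB_best_fold_spec (words : List String) (i : Nat) :
    ∀ (es : List (List String × String)) (b0 : Nat × String),
      (es.foldl (fun best e =>
          if e.1.length > best.1 ∧
              PySem.List.slice words (some (i : Int)) (some ((i + e.1.length : Nat) : Int)) = e.1 then
            (e.1.length, e.2)
          else best) b0 = b0 ∨
        ∃ e ∈ es,
          PySem.List.slice words (some (i : Int)) (some ((i + e.1.length : Nat) : Int)) = e.1 ∧
          es.foldl (fun best e =>
            if e.1.length > best.1 ∧
                PySem.List.slice words (some (i : Int)) (some ((i + e.1.length : Nat) : Int)) = e.1 then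
              (e.1.length, e.2)
            else best) b0 = (e.1.length, e.2)) ∧
      b0.1 ≤ (es.foldl (fun best e =>
          if e.1.length > best.1 ∧
              PySem.List.slice words (some (i : Int)) (some ((i + e.1.length : Nat) : Int)) = e.1 then
            (e.1.length, e.2)
          else best) b0).1 ∧
      ∀ e ∈ es,
        PySem.List.slice words (some (i : Int)) (some ((i + e.1.length : Nat) : Int)) = e.1 →
        e.1.length ≤ (es.foldl (fun best e =>
          if e.1.length > best.1 ∧
              PySem.List.slice words (some (i : Int)) (some ((i + e.1.length : Nat) : Int)) = e.1 then
            (e.1.length, e.2)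
          else best) b0).1 := by
  intro es
  induction es with
  | nil => intro b0; exact ⟨Or.inl rfl, le_refl _, by simp⟩
  | cons e es ih =>
    intro b0
    simp only [List.foldl_cons]
    set b1 := if e.1.length > b0.1 ∧
        PySem.List.slice words (some (i : Int)) (some ((i + e.1.length : Nat) : Int)) = e.1 then
      (e.1.length, e.2) else b0 with hb1
    obtain ⟨ih1, ih2, ih3⟩ := ih b1
    have hb01 : b0.1 ≤ b1.1 := by
      rw [hb1]; split <;> omega
    refine ⟨?_, le_trans hb01 ih2, ?_⟩
    · rcases ih1 with h | ⟨e', he', hm', hr'⟩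
      · rw [h, hb1]
        split
        · rename_i hcond
          exact Or.inr ⟨e, List.mem_cons_self .., hcond.2, rfl⟩
        · exact Or.inl rfl
      · exact Or.inr ⟨e', List.mem_cons_of_mem _ he', hm', hr'⟩
    · intro e'' he'' hm''
      rcases List.mem_cons.mp he'' with h | h
      · subst h
        by_cases hcond : e''.1.length > b0.1
        · have : b1.1 = e''.1.length := by rw [hb1, if_pos ⟨hcond, hm''⟩]
          omega
        · omega
      · exact ih3 e'' h hm''

-- ===== bridge between A's phrase-membership and B's token-slice matches =====

theorem words_good (s : String) :
    ∀ w ∈ PySem.Str.split₀ s, w.toList ≠ [] ∧ ' ' ∉ w.toList := by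
  intro w hw
  rcases List.mem_map.mp hw with ⟨cw, hcw, rfl⟩
  obtain ⟨h1, h2⟩ := split₀_good s.toList cw hcw
  rw [String.toList_ofList]
  refine ⟨h1, fun hsp => ?_⟩
  have := h2 ' ' hsp
  simp [PySem.Chars.isspace] at this

theorem toks_ne_nil (k : String) : tB_toks k ≠ [] := by
  rw [tB_toks_eq]
  simpa using List.splitOnP_ne_nil (· == ' ') k.toList

theorem slice_good (words : List String) (i t : Nat)
    (hgood : ∀ w ∈ words, w.toList ≠ [] ∧ ' ' ∉ w.toList) :
    ∀ w ∈ List.take (t - i) (List.drop i words), ' ' ∉ w.toList := by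
  intro w hw
  exact (hgood w (List.mem_of_mem_drop (List.mem_of_mem_take hw))).2

theorem match_spec (sd : List (String × String)) (words : List String)
    (hgood : ∀ w ∈ words, w.toList ≠ [] ∧ ' ' ∉ w.toList) (i : Nat)
    (e : List String × String) (he : e ∈ tB_entries sd)
    (hm : PySem.List.slice words (some (i : Int)) (some ((i + e.1.length : Nat) : Int)) = e.1) :
    (PySem.Dict.ofList sd).contains (tA_phrase words i (i + e.1.length)) = true ∧
    (PySem.Dict.ofList sd).getD (tA_phrase words i (i + e.1.length)) "" = e.2 ∧
    i + e.1.length ≤ words.length ∧ 0 < e.1.length := by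
  rcases List.mem_map.mp he with ⟨p, hp, rfl⟩
  simp only at hm ⊢
  have hslice : PySem.List.slice words (some (i : Int)) (some ((i + (tB_toks p.1).length : Nat) : Int))
      = List.take ((i + (tB_toks p.1).length) - i) (List.drop i words) :=
    PySem.List.slice_natCast words i (i + (tB_toks p.1).length)
  rw [hslice] at hm
  have hlen0 : 0 < (tB_toks p.1).length := List.length_pos_iff.mpr (toks_ne_nil p.1)
  have hlen : i + (tB_toks p.1).length ≤ words.length := by
    have := congrArg List.length hm
    simp [List.length_take, List.length_drop] at this
    omega
  have hkey : p.1 = tA_phrase words i (i + (tB_toks p.1).length) := by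
    rw [tA_phrase, hslice, ← (toks_eq_iff p.1 _ ?_ ?_)]
    · exact hm.symm
    · intro hnil
      rw [hnil] at hm
      rw [← hm] at hlen0
      simp at hlen0
    · exact slice_good words i _ hgood
  refine ⟨?_, ?_, hlen, hlen0⟩
  · rw [← hkey]
    exact (dict_contains_iff _ _).mpr ⟨p, hp, rfl⟩
  · rw [← hkey]
    exact dict_getD_of_mem _ _ _ (PySem.Dict.nodup_keys_ofList sd) (by simpa using hp)

theorem contains_to_match (sd : List (String × String)) (words : List String)
    (hgood : ∀ w ∈ words, w.toList ≠ [] ∧ ' ' ∉ w.toList) (i t : Nat)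
    (h1 : i < t) (h2 : t ≤ words.length)
    (hc : (PySem.Dict.ofList sd).contains (tA_phrase words i t) = true) :
    ∃ e ∈ tB_entries sd, e.1.length = t - i ∧
      PySem.List.slice words (some (i : Int)) (some ((i + e.1.length : Nat) : Int)) = e.1 := by
  rcases (dict_contains_iff _ _).mp hc with ⟨p, hp, hpk⟩
  have hslice : PySem.List.slice words (some (i : Int)) (some (t : Int))
      = List.take (t - i) (List.drop i words) := PySem.List.slice_natCast words i t
  have hws_len : (List.take (t - i) (List.drop i words)).length = t - i := by
    simp [List.length_take, List.length_drop]; omega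
  have hws_ne : List.take (t - i) (List.drop i words) ≠ [] := by
    intro h; rw [h] at hws_len; simp at hws_len; omega
  have htoks : tB_toks p.1 = List.take (t - i) (List.drop i words) := by
    rw [toks_eq_iff p.1 _ hws_ne (slice_good words i t hgood)]
    rw [hpk, tA_phrase, hslice]
  refine ⟨(tB_toks p.1, p.2), List.mem_map.mpr ⟨p, hp, rfl⟩, ?_, ?_⟩
  · simp [htoks, hws_len]
  · simp only [htoks, hws_len]
    have : i + (t - i) = t := by omega
    rw [this, PySem.List.slice_natCast words i t]

-- ===== the per-position step lemma =====

theorem step_none (sd : List (String × String)) (words : List String)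
    (hgood : ∀ w ∈ words, w.toList ≠ [] ∧ ' ' ∉ w.toList) (i : Nat)
    (hf : tA_find (PySem.Dict.ofList sd) words i words.length = none) :
    tB_best words i (tB_entries sd) = (0, words.getD i "") := by
  obtain ⟨h1, _, _⟩ := tB_best_fold_spec words i (tB_entries sd) (0, words.getD i "")
  rcases h1 with h | ⟨e, he, hm, hr⟩
  · exact h
  · obtain ⟨hc, _, hle, hpos⟩ := match_spec sd words hgood i e he hm
    rw [(tA_find_none_iff _ words i words.length).mp hf (i + e.1.length) (by omega) hle] at hc
    exact absurd hc (by simp)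

theorem step_some (sd : List (String × String)) (words : List String)
    (hgood : ∀ w ∈ words, w.toList ≠ [] ∧ ' ' ∉ w.toList) (i : Nat) (v : String) (j : Nat)
    (hf : tA_find (PySem.Dict.ofList sd) words i words.length = some (v, j)) :
    tB_best words i (tB_entries sd) = (j - i, v) := by
  have hij : i < j := tA_find_gt hf
  obtain ⟨hjn, hc, hv, hmax⟩ := tA_find_some_spec _ words i words.length v j hf
  obtain ⟨e0, he0, he0len, he0m⟩ := contains_to_match sd words hgood i j hij hjn hc
  obtain ⟨h1, _, h3⟩ := tB_best_fold_spec words i (tB_entries sd) (0, words.getD i "")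
  have hlow : j - i ≤ (tB_best words i (tB_entries sd)).1 := by
    rw [tB_best]
    exact he0len ▸ h3 e0 he0 he0m
  rcases h1 with h | ⟨e, he, hm, hr⟩
  · rw [tB_best, h] at hlow
    simp at hlow
    omega
  · obtain ⟨hce, hval, hle, hpos⟩ := match_spec sd words hgood i e he hm
    have hje : i + e.1.length ≤ j := by
      by_contra hgt
      rw [hmax (i + e.1.length) (by omega) hle] at hce
      exact absurd hce (by simp)
    have hlen : e.1.length = j - i := by
      rw [tB_best, hr] at hlow
      simp at hlow
      omega
    have hij' : i + e.1.length = j := by omega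
    rw [tB_best, hr, hlen, hv, ← hij', hval]

-- ===== the loop equivalence and the final theorem =====

theorem loop_eq (sd : List (String × String)) (words : List String)
    (hgood : ∀ w ∈ words, w.toList ≠ [] ∧ ' ' ∉ w.toList) :
    ∀ (k i : Nat) (acc : List String), words.length - i ≤ k →
      tA_loop (PySem.Dict.ofList sd) words i acc = tB_loop words (tB_entries sd) i acc := by
  intro k
  induction k with
  | zero =>
    intro i acc h
    have hi : ¬ i < words.length := by omega
    rw [tA_loop, tB_loop, dif_neg hi, if_neg hi]
  | succ k ih =>
    intro i acc h
    by_cases hi : i < words.length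
    · rw [tA_loop, tB_loop, dif_pos hi, if_pos hi]
      split
      · rename_i v j hfm
        have hij : i < j := tA_find_gt hfm
        rw [step_some sd words hgood i v j hfm]
        simp only
        rw [if_neg (by omega), show i + (j - i) = j from by omega]
        exact ih j (acc ++ [v]) (by omega)
      · rename_i hfm
        rw [step_none sd words hgood i hfm]
        have hget : words.getD i "" = words[i] := by
          simp [List.getD_eq_getElem?_getD, List.getElem?_eq_getElem hi]
        rw [hget]
        exact ih (i + 1) (acc ++ [words[i]]) (by omega)
    · rw [tA_loop, tB_loop, dif_neg hi, if_neg hi]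

-- ===== VERDICT (by name: the statement is the Claim_ definition above) =====
theorem translate_text_spec : Claim_equal_translate_text := by
  intro text sd _
  unfold Spec_translate_text translate_text translate_text_alt
  simp only
  rw [loop_eq sd _ (words_good _) ((PySem.Str.split₀ (PySem.Str.strip (PySem.Str.lower text))).length) 0 [] (by omega)]
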